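-- pv_equiv track=rewrite | github.com/AleksVassiliev/AdventOfCode | 2015/day01/day01.py | solve_v2
-- ===== SOURCE A (Python) =====
-- def solve_v2(data):
--     res = 0
--     for idx, c in enumerate(data):
--         if c == '(':
--             res += 1
--         elif c == ')':
--             res -= 1
--         if res == -1:
--             return (idx + 1)
--     return 0
-- ===== SOURCE B (Python) =====
-- def solve_v2(data):
--     # Phase 1: build the list of running prefix sums.
--     sums = []
--     s = 0
--     for c in data:
--         s += (c == '(') - (c == ')')
--         sums.append(s)
--     # Phase 2: first position where the prefix sum is -1 (1-based), else 0.
--     try: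
--         return sums.index(-1) + 1
--     except ValueError:
--         return 0
-- ===== Notes on version B (the rewrite author's own statement) =====
-- stated objective: alternative
-- what changed: A fuses increment and test in one early-returning loop; B first builds the full prefix-sum list with delta arithmetic (no branching on the test) and then finds the first -1 via list.index.
import Mathlib
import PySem

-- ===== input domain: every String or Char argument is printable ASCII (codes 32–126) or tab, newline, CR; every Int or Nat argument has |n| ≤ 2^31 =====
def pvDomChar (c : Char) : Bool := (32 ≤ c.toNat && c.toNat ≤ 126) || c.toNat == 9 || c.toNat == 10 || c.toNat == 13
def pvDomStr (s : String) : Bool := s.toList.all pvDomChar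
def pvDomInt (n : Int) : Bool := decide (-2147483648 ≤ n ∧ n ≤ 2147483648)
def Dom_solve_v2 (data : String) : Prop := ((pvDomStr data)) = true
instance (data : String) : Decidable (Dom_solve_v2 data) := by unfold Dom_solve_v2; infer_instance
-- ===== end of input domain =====

-- B builds the full prefix-sum list and then searches it with list.index, instead of A's fused increment-and-test loop; same O(n) cost, different decomposition.

-- ===== PORT A =====
def pvLoopA : List Char → Int → Nat → Int
  | [], _, _ => 0
  | c :: rest, res, idx =>
    let res' := if c = '(' then res + 1 else if c = ')' then res - 1 else res
    if res' = -1 then ((idx : Int) + 1) else pvLoopA rest res' (idx + 1)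

def solve_v2 (data : String) : Int := pvLoopA data.toList 0 0

-- ===== PORT B =====
-- s += (c == '(') - (c == ')')
def pvDelta (c : Char) : Int := (if c = '(' then 1 else 0) - (if c = ')' then 1 else 0)

-- phase 1 loop: the list of running prefix sums
def pvSums : List Char → Int → List Int
  | [], _ => []
  | c :: rest, s => let s' := s + pvDelta c; s' :: pvSums rest s'

def solve_v2_alt (data : String) : Int :=
  match PySem.List.index? (pvSums data.toList 0) (-1) with
  | some i => (i : Int) + 1
  | none => 0

-- ===== PRECONDITION & SPEC =====
def Spec_solve_v2 (data : String) (out : Int) : Prop := out = solve_v2_alt data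
instance (data : String) (out : Int) : Decidable (Spec_solve_v2 data out) := by unfold Spec_solve_v2; infer_instance

-- ===== CLAIM (what is proved, stated in full; the proofs are below) =====
def Claim_equal_solve_v2 : Prop := ∀ (data : String), Dom_solve_v2 data → Spec_solve_v2 data (solve_v2 data)

-- ===== LEMMAS AND PROOFS =====
theorem pvLoopA_eq (l : List Char) : ∀ (res : Int) (idx : Nat),
    pvLoopA l res idx =
      match PySem.List.index? (pvSums l res) (-1) with
      | some i => (idx : Int) + i + 1
      | none => 0 := by
  induction l with
  | nil => intro res idx; simp [pvLoopA, pvSums, PySem.List.index?]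
  | cons c rest ih =>
    intro res idx
    have hres : (if c = '(' then res + 1 else if c = ')' then res - 1 else res)
        = res + pvDelta c := by
      unfold pvDelta; split_ifs <;> simp_all <;> ring
    show (if (if c = '(' then res + 1 else if c = ')' then res - 1 else res) = -1
          then ((idx : Int) + 1)
          else pvLoopA rest (if c = '(' then res + 1 else if c = ')' then res - 1 else res) (idx + 1)) = _
    rw [hres]
    by_cases h : res + pvDelta c = -1
    · have hidx : PySem.List.index? (pvSums (c :: rest) res) (-1) = some 0 := by
        show PySem.List.index? ((res + pvDelta c) :: pvSums rest (res + pvDelta c)) (-1) = some 0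
        rw [h]; exact PySem.List.index?_cons_self _ _
      rw [if_pos h, hidx]; simp
    · rw [if_neg h]
      have hcons : PySem.List.index? (pvSums (c :: rest) res) (-1)
          = (PySem.List.index? (pvSums rest (res + pvDelta c)) (-1)).map (· + 1) := by
        show PySem.List.index? ((res + pvDelta c) :: pvSums rest (res + pvDelta c)) (-1) = _
        exact PySem.List.index?_cons_of_ne _ h
      rw [hcons, ih (res + pvDelta c) (idx + 1)]
      cases PySem.List.index? (pvSums rest (res + pvDelta c)) (-1) with
      | none => simp
      | some i => simp [Option.map]; ring

-- ===== VERDICT (by name: the statement is the Claim_ definition above) =====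
theorem solve_v2_spec : Claim_equal_solve_v2 := by
  intro data _
  unfold Spec_solve_v2 solve_v2 solve_v2_alt
  rw [pvLoopA_eq]
  cases PySem.List.index? (pvSums data.toList 0) (-1) with
  | none => rfl
  | some i => simp
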